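-- pv_equiv track=rewrite | github.com/manavi1206/Mutual-Fund-Chatbot | clean_chunks.py | remove_repeated_headers_footers
-- ===== SOURCE A (Python) =====
-- def remove_repeated_headers_footers(text: str) -> str:
--     """Remove repeated headers/footers that occur >3 times"""
--     lines = text.split(" ")
--     word_counts = {}
--     for word in lines:
--         word_counts[word] = word_counts.get(word, 0) + 1
--
--     # Remove words that appear >3 times and are likely headers/footers
--     # (short words, all caps, or common header patterns)
--     filtered_words = []
--     for word in lines:
--         if word_counts[word] > 3:
--             # Check if it's likely a header/footer
--             if (len(word) < 10 and word.isupper()) or word in ["Page", "Page:", "©", "Copyright"]: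
--                 continue
--         filtered_words.append(word)
--
--     return " ".join(filtered_words)
-- ===== SOURCE B (Python) =====
-- def remove_repeated_headers_footers(text: str) -> str:
--     """Single online pass: append words as they come; when a header/footer-like
--     word's running count reaches 4, retroactively delete its kept occurrences
--     and ban it from then on. No precomputed count table, no second scan."""
--     out = []
--     seen = {}
--     for w in text.split(" "):
--         c = seen.get(w, 0) + 1
--         seen[w] = c
--         headerish = (len(w) < 10 and w.isupper()) or w in ("Page", "Page:", "\u00a9", "Copyright")
--         if c == 4 and headerish:
--             out = [u for u in out if u != w]
--         elif c <= 3 or not headerish: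
--             out.append(w)
--     return " ".join(out)
-- ===== Notes on version B (the rewrite author's own statement) =====
-- stated objective: alternative
-- what changed: B replaces A's two-phase count-then-filter with a single online pass: words are appended as they arrive, and the moment a header/footer-like word's running count reaches 4 its earlier occurrences are retroactively deleted from the output and it is banned thereafter - no precomputed frequency table and no second scan of the text.
import Mathlib
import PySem

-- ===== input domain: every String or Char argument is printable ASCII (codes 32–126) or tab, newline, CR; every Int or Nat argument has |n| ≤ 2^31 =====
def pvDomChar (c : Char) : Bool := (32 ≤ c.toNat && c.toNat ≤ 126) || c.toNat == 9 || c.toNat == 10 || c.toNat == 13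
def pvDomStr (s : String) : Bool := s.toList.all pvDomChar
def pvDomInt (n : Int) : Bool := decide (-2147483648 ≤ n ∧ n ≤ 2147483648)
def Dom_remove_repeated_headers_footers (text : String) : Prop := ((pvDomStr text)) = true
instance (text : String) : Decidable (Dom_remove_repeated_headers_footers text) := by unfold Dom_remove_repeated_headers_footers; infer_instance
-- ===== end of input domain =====

-- B replaces A's two-phase count-then-filter by a single online pass that appends words as they
-- come and retroactively deletes (and thereafter bans) a header/footer-like word the moment its
-- running count reaches 4 (objective: alternative; same result, no precomputed count table).

-- shared primitive ports (the same Python expressions occur verbatim in A and B):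
-- str.isupper(): at least one cased char and no lowercase cased char; exact on ASCII,
-- where the cased characters are exactly the letters.
def pyStrIsupper (s : String) : Bool :=
  s.toList.any PySem.Chars.isupper && !(s.toList.any PySem.Chars.islower)

-- the header/footer test '(len(word) < 10 and word.isupper()) or word in ["Page","Page:","©","Copyright"]'
def pvHeaderish (w : String) : Bool :=
  (PySem.Str.len w < 10 && pyStrIsupper w) || w ∈ ["Page", "Page:", "©", "Copyright"]

-- ===== PORT A =====
-- counts[word] is rendered as getD _ 0: every word filtered over is a key of the dict built
-- from the same list, so the default is never taken (A raises nowhere; no Pre_).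
-- split? is some here (the separator " " is nonempty), so .getD [] never takes its default.
def remove_repeated_headers_footers (text : String) : String :=
  let lines := (PySem.Str.split? text " ").getD []
  let word_counts := lines.foldl (fun d w => d.insert w (d.getD w 0 + 1))
    (PySem.Dict.empty : PySem.Dict String Int)
  let filtered_words := lines.foldl (fun acc w =>
    if word_counts.getD w 0 > 3 then
      if pvHeaderish w then acc else acc ++ [w]
    else acc ++ [w]) []
  PySem.Str.join " " filtered_words

-- ===== PORT B =====
-- state (out, seen); the list comprehension '[u for u in out if u != w]' is out.filter (· != w)
def remove_repeated_headers_footers_alt (text : String) : String :=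
  let res := ((PySem.Str.split? text " ").getD []).foldl
    (fun (st : List String × PySem.Dict String Int) w =>
      let c := st.2.getD w 0 + 1
      let seen := st.2.insert w c
      if c == 4 && pvHeaderish w then (st.1.filter (fun u => u != w), seen)
      else if decide (c ≤ 3) || !pvHeaderish w then (st.1 ++ [w], seen)
      else (st.1, seen))
    ([], PySem.Dict.empty)
  PySem.Str.join " " res.1

-- ===== PRECONDITION & SPEC =====
def Spec_remove_repeated_headers_footers (text : String) (out : String) : Prop := out = remove_repeated_headers_footers_alt text
instance (text : String) (out : String) : Decidable (Spec_remove_repeated_headers_footers text out) := by unfold Spec_remove_repeated_headers_footers; infer_instance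

-- ===== CLAIM (what is proved, stated in full; the proofs are below) =====
def Claim_equal_remove_repeated_headers_footers : Prop := ∀ (text : String), Dom_remove_repeated_headers_footers text → Spec_remove_repeated_headers_footers text (remove_repeated_headers_footers text)

-- ===== LEMMAS AND PROOFS =====

-- the total-count keep predicate both programs implement
def pvKeep (l : List String) (u : String) : Bool :=
  !(decide ((l.count u : Int) > 3) && pvHeaderish u)

-- A's nested-if loop body is the append-unless-(count>3 ∧ headerish) filter body.
theorem pv_filtered_eq (lines : List String) (d : PySem.Dict String Int) :
    lines.foldl (fun acc w =>
      if d.getD w 0 > 3 then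
        if pvHeaderish w then acc else acc ++ [w]
      else acc ++ [w]) [] =
    lines.filter (fun w => !(d.getD w 0 > 3 && pvHeaderish w)) := by
  have h := PySem.List.foldl_append_if_eq_filter
    (l := lines) (acc := ([] : List String))
    (p := fun w => !(d.getD w 0 > 3 && pvHeaderish w))
  simp only [List.nil_append] at h
  rw [← h]
  congr 1
  funext acc w
  by_cases h1 : d.getD w 0 > 3 <;> by_cases h2 : pvHeaderish w = true <;>
    simp [h1, h2]

-- the invariant of B's online loop: the dict holds the prefix counts and the accumulated
-- output is the prefix filtered by the prefix-count keep predicate.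
theorem pv_bfold_inv (l : List String) :
    (∀ u, (l.foldl
      (fun (st : List String × PySem.Dict String Int) w =>
        let c := st.2.getD w 0 + 1
        let seen := st.2.insert w c
        if c == 4 && pvHeaderish w then (st.1.filter (fun u => u != w), seen)
        else if decide (c ≤ 3) || !pvHeaderish w then (st.1 ++ [w], seen)
        else (st.1, seen))
      ([], PySem.Dict.empty)).2.getD u 0 = (l.count u : Int)) ∧
    (l.foldl
      (fun (st : List String × PySem.Dict String Int) w =>
        let c := st.2.getD w 0 + 1
        let seen := st.2.insert w c
        if c == 4 && pvHeaderish w then (st.1.filter (fun u => u != w), seen)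
        else if decide (c ≤ 3) || !pvHeaderish w then (st.1 ++ [w], seen)
        else (st.1, seen))
      ([], PySem.Dict.empty)).1 = l.filter (pvKeep l) := by
  induction l using List.reverseRecOn with
  | nil => simp [PySem.Dict.getD_empty]
  | append_singleton l w ih =>
    obtain ⟨ihd, ihout⟩ := ih
    rw [List.foldl_append] at *
    simp only [List.foldl_cons, List.foldl_nil]
    -- counts over l ++ [w]
    have hcount : ∀ u, ((l ++ [w]).count u : Int) =
        (l.count u : Int) + (if u = w then 1 else 0) := by
      intro u
      by_cases hu : u = w <;> simp [hu, List.count_append, List.count_eq_zero]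
    have hstep : ∀ (st : List String × PySem.Dict String Int),
        ((fun (st : List String × PySem.Dict String Int) w =>
          let c := st.2.getD w 0 + 1
          let seen := st.2.insert w c
          if c == 4 && pvHeaderish w then (st.1.filter (fun u => u != w), seen)
          else if decide (c ≤ 3) || !pvHeaderish w then (st.1 ++ [w], seen)
          else (st.1, seen)) st w).2 = st.2.insert w (st.2.getD w 0 + 1) := by
      intro st
      dsimp only
      split_ifs <;> rfl
    constructor
    · intro u
      rw [hstep, PySem.Dict.getD_insert]
      by_cases hu : u = w
      · subst hu
        rw [if_pos rfl, ihd, hcount, if_pos rfl]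
      · rw [if_neg hu, ihd u, hcount u, if_neg hu, add_zero]
    · -- output component
      set c0 : Int := (l.foldl _ ([], PySem.Dict.empty)).2.getD w 0 with hc0
      have hc0v : c0 = (l.count w : Int) := ihd w
      have hkeep_ne : ∀ u, u ≠ w → pvKeep (l ++ [w]) u = pvKeep l u := by
        intro u hu
        have h0 : List.count u [w] = 0 := by simp [List.count_eq_zero, hu]
        simp [pvKeep, List.count_append, h0]
      by_cases hH : pvHeaderish w = true
      · by_cases h4 : l.count w = 3
        · -- running count hits 4: retroactive deletion
          have : (c0 + 1 == 4 && pvHeaderish w) = true := by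
            simp [hc0v, h4, hH]
          simp only [this, if_pos]
          rw [ihout, List.filter_filter, List.filter_append]
          have hw : pvKeep (l ++ [w]) w = false := by
            simp [pvKeep, List.count_append, h4, hH]
          have : l.filter (pvKeep (l ++ [w])) = l.filter (fun u => pvKeep l u && u != w) := by
            apply List.filter_congr
            intro u _
            by_cases hu : u = w
            · subst hu
              simp only [hw]
              simp [pvKeep, h4, hH]
            · simp [hkeep_ne u hu, hu]
          simp [this, hw, Bool.and_comm]
        · by_cases h3 : l.count w ≤ 2
          · -- still below the threshold: plain append
            have hb1 : (c0 + 1 == 4 && pvHeaderish w) = false := by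
              simp [hc0v]; omega
            have hb2 : (decide (c0 + 1 ≤ 3) || !pvHeaderish w) = true := by
              simp [hc0v]; omega
            simp only [hb1, hb2, Bool.false_eq_true, if_false, if_pos]
            rw [ihout, List.filter_append]
            have hw : pvKeep (l ++ [w]) w = true := by
              simp [pvKeep, List.count_append]
              omega
            have hlw : pvKeep l w = true := by
              simp [pvKeep]
              omega
            have : l.filter (pvKeep (l ++ [w])) = l.filter (pvKeep l) := by
              apply List.filter_congr
              intro u _
              by_cases hu : u = w
              · subst hu
                rw [hw, hlw]
              · exact hkeep_ne u hu
            simp [this, hw]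
          · -- already banned (count ≥ 4): skip
            have h5 : 4 ≤ l.count w := by omega
            have hb1 : (c0 + 1 == 4 && pvHeaderish w) = false := by
              simp [hc0v]; omega
            have hb2 : (decide (c0 + 1 ≤ 3) || !pvHeaderish w) = false := by
              simp [hc0v, hH]; omega
            simp only [hb1, hb2, Bool.false_eq_true, if_false]
            rw [ihout, List.filter_append]
            have hw : pvKeep (l ++ [w]) w = false := by
              simp [pvKeep, List.count_append, hH]
              omega
            have hlw : pvKeep l w = false := by
              simp [pvKeep, hH]
              omega
            have : l.filter (pvKeep (l ++ [w])) = l.filter (pvKeep l) := by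
              apply List.filter_congr
              intro u _
              by_cases hu : u = w
              · subst hu
                rw [hw, hlw]
              · exact hkeep_ne u hu
            simp [this, hw]
      · -- not header/footer-like: always kept
        have hHf : pvHeaderish w = false := by simpa using hH
        have hb1 : (c0 + 1 == 4 && pvHeaderish w) = false := by simp [hHf]
        have hb2 : (decide (c0 + 1 ≤ 3) || !pvHeaderish w) = true := by simp [hHf]
        simp only [hb1, hb2, Bool.false_eq_true, if_false, if_pos]
        rw [ihout, List.filter_append]
        have hw : pvKeep (l ++ [w]) w = true := by simp [pvKeep, hHf]
        have : l.filter (pvKeep (l ++ [w])) = l.filter (pvKeep l) := by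
          apply List.filter_congr
          intro u _
          by_cases hu : u = w
          · subst hu; simp [pvKeep, hHf]
          · exact hkeep_ne u hu
        simp [this, hw]

-- ===== VERDICT (by name: the statement is the Claim_ definition above) =====
theorem remove_repeated_headers_footers_spec : Claim_equal_remove_repeated_headers_footers := by
  intro text _
  unfold Spec_remove_repeated_headers_footers
  unfold remove_repeated_headers_footers remove_repeated_headers_footers_alt
  simp only [pv_filtered_eq, (pv_bfold_inv ((PySem.Str.split? text " ").getD [])).2]
  congr 1
  apply List.filter_congr
  intro w _
  have hcount : (((PySem.Str.split? text " ").getD []).foldl (fun d w => d.insert w (d.getD w 0 + 1))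
      (PySem.Dict.empty : PySem.Dict String Int)).getD w 0
      = (((PySem.Str.split? text " ").getD []).count w : Int) := by
    rw [PySem.Dict.getD_foldl_insert_add_one]
    simp [PySem.Dict.getD_empty]
  simp [pvKeep, hcount]
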